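-- pv_equiv track=rewrite | github.com/Dementr2302/CRIPTA | Lab_3.py | gf2_poly_powmod
-- ===== SOURCE A (Python) =====
-- def gf2_poly_mul(a, b):
--     result = [0] * (len(a) + len(b) - 1)
--     for i, coeff_a in enumerate(a):
--         for j, coeff_b in enumerate(b):
--             result[i + j] ^= (coeff_a & coeff_b)
--     return result
--
-- def gf2_poly_mod(poly, mod_poly):
--     def degree(p):
--         while p and p[-1] == 0:
--             p.pop()  # Удаляем нулевые коэффициенты с конца
--         return len(p) - 1
--
--     dp = degree(poly)
--     dm = degree(mod_poly)
--     while dp >= dm: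
--         diff = [0]*(dp - dm) + mod_poly
--         for i in range(len(poly)):
--             poly[i] ^= diff[i]
--         dp = degree(poly)
--     return poly
--
-- def gf2_poly_powmod(x, k, mod_poly):
--     result = [1]  # многочлен степени 0
--     while k > 0:
--         if k & 1:
--             result = gf2_poly_mod(gf2_poly_mul(result, x), mod_poly)
--         x = gf2_poly_mod(gf2_poly_mul(x, x), mod_poly)
--         k >>= 1
--     return result
-- ===== SOURCE B (Python) =====
-- def gf2_poly_powmod(x, k, mod_poly):
--     # Bitmask polynomials + one-pass Horner modular multiplication (no full product,
--     # no long-division loop) + recursive top-down exponentiation.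
--     if k <= 0:
--         return [1]
--     m = 0
--     for i, c in enumerate(mod_poly):
--         if c:
--             m |= 1 << i
--     xv = 0
--     for i, c in enumerate(x):
--         if c:
--             xv |= 1 << i
--     d = m.bit_length()
--
--     def red(a):
--         # a mod m, feeding a's bits high->low into a reduced accumulator
--         r = 0
--         for i in range(a.bit_length() - 1, -1, -1):
--             r = (r << 1) | ((a >> i) & 1)
--             if (r >> (d - 1)) & 1:
--                 r ^= m
--         return r
--
--     def mulmod(a, b):
--         # (a*b) mod m by Horner over a's bits; b and the accumulator stay reduced
--         r = 0
--         for i in range(a.bit_length() - 1, -1, -1):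
--             r = (r << 1) ^ (b if (a >> i) & 1 else 0)
--             if (r >> (d - 1)) & 1:
--                 r ^= m
--         return r
--
--     xr = red(xv)
--
--     def pw(e):
--         if e == 1:
--             return xr
--         h = pw(e >> 1)
--         h2 = mulmod(h, h)
--         return mulmod(h2, xr) if e & 1 else h2
--
--     r = pw(k)
--     return [(r >> i) & 1 for i in range(r.bit_length())]
-- ===== Notes on version B (the rewrite author's own statement) =====
-- stated objective: alternative
-- what changed: Replaces A's coefficient-list arithmetic (schoolbook nested-loop convolution followed by a separate long-division reduction loop with repeated trailing-zero stripping) by bitmask polynomials with a one-pass Horner modular multiplication that never forms the full product and keeps every intermediate reduced below the modulus degree, and replaces A's iterative LSB-first square-and-multiply accumulator loop by top-down recursion on the exponent; Pre_ keeps k > 0 inputs only on the natural GF(2) domain (all coefficients 0/1, modulus containing a 1), outside which A almost always diverges; …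
-- outside the precondition, e.g. on gf2_poly_powmod([2], 1, [2]): A returns [], B returns []
import Mathlib
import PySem

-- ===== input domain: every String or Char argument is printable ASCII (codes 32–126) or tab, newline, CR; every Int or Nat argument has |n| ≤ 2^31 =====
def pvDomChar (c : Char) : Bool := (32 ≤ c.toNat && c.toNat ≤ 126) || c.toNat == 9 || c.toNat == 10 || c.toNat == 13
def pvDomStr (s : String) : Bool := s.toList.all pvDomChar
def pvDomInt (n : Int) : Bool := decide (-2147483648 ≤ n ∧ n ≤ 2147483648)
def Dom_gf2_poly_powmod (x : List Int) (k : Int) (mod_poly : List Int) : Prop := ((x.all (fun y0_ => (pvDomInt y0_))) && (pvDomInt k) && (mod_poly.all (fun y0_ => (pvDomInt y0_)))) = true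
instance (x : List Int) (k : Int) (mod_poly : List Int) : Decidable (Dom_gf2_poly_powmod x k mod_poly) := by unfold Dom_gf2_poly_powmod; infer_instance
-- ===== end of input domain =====

-- B replaces A's coefficient-list arithmetic (nested-loop convolution + separate long-division
-- reduction) by bitmask polynomials with a one-pass Horner modular multiplication and top-down
-- recursion on the exponent (alternative algorithm, similar cost). Return values agree on Pre_;
-- the Python A strips trailing zeros of the mod_poly list IN PLACE (when k > 0) while B leaves
-- its arguments untouched — the equivalence proved here is about the return value only.

-- ===== PORT A =====

-- `degree`'s in-place stripping of trailing zero coefficients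
def pvStrip (p : List Int) : List Int := ((p.reverse).dropWhile (fun c => c == 0)).reverse

-- the body of `for i in range(len(poly)): poly[i] ^= diff[i]` (the two lengths are equal there)
def pvXorStep (p d : List Int) : List Int := List.zipWith (fun a b => PySem.Int.bxor a b) p d

-- the `while dp >= dm` loop of gf2_poly_mod; the fuel only makes the recursion structural —
-- the call below passes more fuel than the loop can iterate on the admitted inputs
def pvModLoop : Nat → List Int → List Int → List Int
  | 0, p, _ => p
  | f+1, p, m =>
    if (p.length : Int) - 1 ≥ (m.length : Int) - 1 then
      pvModLoop f (pvStrip (pvXorStep p (List.replicate (p.length - m.length) 0 ++ m))) m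
    else p

def pvGf2Mod (poly mod_poly : List Int) : List Int :=
  pvModLoop ((pvStrip poly).length + 1) (pvStrip poly) (pvStrip mod_poly)

-- gf2_poly_mul: result = [0]*(len(a) + len(b) - 1); nested enumerate loops with in-place xor
def pvGf2Mul (a b : List Int) : List Int :=
  (a.zipIdx).foldl (fun res ci =>
    (b.zipIdx).foldl (fun r cj =>
      r.set (ci.2 + cj.2) (PySem.Int.bxor (r.getD (ci.2 + cj.2) 0) (PySem.Int.band ci.1 cj.1))) res)
    (List.replicate (a.length + b.length - 1) 0)

-- the `while k > 0` loop (for these ints k >> 1 is k // 2 and k & 1 is k % 2)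
def pvPowLoopA (k : Int) (result x mod_poly : List Int) : List Int :=
  if _h : k > 0 then
    pvPowLoopA (PySem.Int.floordiv k 2)
      (if PySem.Int.mod k 2 == 1 then pvGf2Mod (pvGf2Mul result x) mod_poly else result)
      (pvGf2Mod (pvGf2Mul x x) mod_poly) mod_poly
  else result
termination_by k.toNat
decreasing_by
  rw [PySem.Int.floordiv_eq_ediv_of_pos (by omega : (0:Int) < 2)]; omega

def gf2_poly_powmod (x : List Int) (k : Int) (mod_poly : List Int) : List Int :=
  pvPowLoopA k [1] x mod_poly

-- ===== PORT B =====

-- mask building: for i, c in enumerate(p): if c: m |= 1 << i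
def pvMask (p : List Int) : Nat :=
  p.zipIdx.foldl (fun (m : Nat) (ci : Int × Nat) => if ci.1 ≠ 0 then m ||| (1 <<< ci.2) else m) 0

-- red(a): for i in range(a.bit_length()-1, -1, -1): r = (r<<1)|bit; conditional ^= m
-- (the down-counting loop is the structural recursion on the loop counter; Nat.size = bit_length)
def pvRedGo (a m d : Nat) : Nat → Nat → Nat
  | 0, r => r
  | i+1, r =>
    pvRedGo a m d i
      (let r1 := (r <<< 1) ||| ((a >>> i) &&& 1)
       if (r1 >>> (d - 1)) &&& 1 == 1 then r1 ^^^ m else r1)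

def pvRed (a m d : Nat) : Nat := pvRedGo a m d a.size 0

-- mulmod(a, b): Horner over a's bits, conditional reduction each step
def pvMulmodGo (a b m d : Nat) : Nat → Nat → Nat
  | 0, r => r
  | i+1, r =>
    pvMulmodGo a b m d i
      (let r1 := (r <<< 1) ^^^ (if (a >>> i) &&& 1 == 1 then b else 0)
       if (r1 >>> (d - 1)) &&& 1 == 1 then r1 ^^^ m else r1)

def pvMulmod (a b m d : Nat) : Nat := pvMulmodGo a b m d a.size 0

-- pw(e): top-down recursion on the exponent (Python recurses on e ≥ 1 only; the e ≤ 1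
-- guard makes the same computation total)
def pvPw (xr m d : Nat) (e : Int) : Nat :=
  if _h : e ≤ 1 then xr
  else
    let h := pvPw xr m d (PySem.Int.floordiv e 2)
    let h2 := pvMulmod h h m d
    if PySem.Int.mod e 2 == 1 then pvMulmod h2 xr m d else h2
termination_by e.toNat
decreasing_by
  rw [PySem.Int.floordiv_eq_ediv_of_pos (by omega : (0:Int) < 2)]; omega

-- [(r >> i) & 1 for i in range(r.bit_length())]: the little-endian bits of r, [] for 0
def pvBits (n : Nat) : List Int :=
  if _h : n = 0 then [] else ((n % 2 : Nat) : Int) :: pvBits (n / 2)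
termination_by n
decreasing_by exact Nat.div_lt_self (Nat.pos_of_ne_zero _h) (by omega)

def gf2_poly_powmod_alt (x : List Int) (k : Int) (mod_poly : List Int) : List Int :=
  if k ≤ 0 then [1]
  else
    let m := pvMask mod_poly
    let xv := pvMask x
    let d := m.size
    let xr := pvRed xv m d
    pvBits (pvPw xr m d k)

-- ===== PRECONDITION & SPEC =====
-- Pre_ restricts k > 0 to the function's natural domain: GF(2) polynomials (every coefficient
-- 0 or 1) whose modulus has at least one 1 coefficient.  Outside it A's bitwise arithmetic on
-- arbitrary ints almost always diverges (the leading coefficients never cancel, so the degree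
-- never drops); the rare excluded inputs on which cancellation still lets A return lie outside
-- the GF(2)-polynomial domain the function exists for.
def Pre_gf2_poly_powmod (x : List Int) (k : Int) (mod_poly : List Int) : Prop :=
  k ≤ 0 ∨ ((∀ c ∈ x, c = 0 ∨ c = 1) ∧ (∀ c ∈ mod_poly, c = 0 ∨ c = 1) ∧ (1 : Int) ∈ mod_poly)
instance (x : List Int) (k : Int) (mod_poly : List Int) : Decidable (Pre_gf2_poly_powmod x k mod_poly) := by unfold Pre_gf2_poly_powmod; infer_instance

def pvWitness_gf2_poly_powmod : List Int × Int × List Int := ([1, 1], 3, [1, 1, 0, 1])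

def Spec_gf2_poly_powmod (x : List Int) (k : Int) (mod_poly : List Int) (out : List Int) : Prop := out = gf2_poly_powmod_alt x k mod_poly
instance (x : List Int) (k : Int) (mod_poly : List Int) (out : List Int) : Decidable (Spec_gf2_poly_powmod x k mod_poly out) := by unfold Spec_gf2_poly_powmod; infer_instance

-- ===== CLAIM (what is proved, stated in full; the proofs are below) =====
def Claim_equal_gf2_poly_powmod : Prop := ∀ (x : List Int) (k : Int) (mod_poly : List Int), Dom_gf2_poly_powmod x k mod_poly → Pre_gf2_poly_powmod x k mod_poly → Spec_gf2_poly_powmod x k mod_poly (gf2_poly_powmod x k mod_poly)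

-- ===== LEMMAS AND PROOFS =====

-- proof-only bitmask model of A's list arithmetic (not part of either port)
def pvClmulGo (a b s r : Nat) : Nat :=
  if _h : a = 0 then r
  else pvClmulGo (a / 2) b (s + 1) (if a % 2 = 1 then r ^^^ (b <<< s) else r)
termination_by a
decreasing_by exact Nat.div_lt_self (Nat.pos_of_ne_zero _h) (by omega)

def pvClmul (a b : Nat) : Nat := pvClmulGo a b 0 0

def pvReduceGo : Nat → Nat → Nat → Nat
  | 0, p, _ => p
  | f+1, p, m => if m.size ≤ p.size then pvReduceGo f (p ^^^ (m <<< (p.size - m.size))) m else p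

def pvReduce (p m : Nat) : Nat := pvReduceGo (p.size + 1) p m

def pvPowLoopB (k : Int) (r xm m : Nat) : Nat :=
  if _h : k > 0 then
    pvPowLoopB (PySem.Int.floordiv k 2)
      (if PySem.Int.mod k 2 == 1 then pvReduce (pvClmul r xm) m else r)
      (pvReduce (pvClmul xm xm) m) m
  else r
termination_by k.toNat
decreasing_by
  rw [PySem.Int.floordiv_eq_ediv_of_pos (by omega : (0:Int) < 2)]; omega

def pvVal : List Int → Nat
  | [] => 0
  | c :: t => c.toNat + 2 * pvVal t

theorem pvVal_replicate (t : Nat) : pvVal (List.replicate t 0) = 0 := by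
  induction t with
  | zero => rfl
  | succ n ih => simp [List.replicate_succ, pvVal, ih]

theorem pvVal_append_zeros (p : List Int) (t : Nat) :
    pvVal (p ++ List.replicate t 0) = pvVal p := by
  induction p with
  | nil => simp [pvVal_replicate, pvVal]
  | cons c q ih => simp [pvVal, ih]

theorem pvStrip_decomp (p : List Int) : ∃ t, p = pvStrip p ++ List.replicate t 0 := by
  refine ⟨(p.reverse.takeWhile (fun c => c == 0)).length, ?_⟩
  have h1 : p.reverse.takeWhile (fun c => c == 0) ++ p.reverse.dropWhile (fun c => c == 0) = p.reverse :=
    List.takeWhile_append_dropWhile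
  have h2 : p.reverse.takeWhile (fun c => c == 0)
      = List.replicate (p.reverse.takeWhile (fun c => c == 0)).length (0 : Int) := by
    rw [List.eq_replicate_iff]
    refine ⟨rfl, fun b hb => ?_⟩
    have := List.mem_takeWhile_imp hb
    simpa using this
  calc p = p.reverse.reverse := by simp
    _ = (p.reverse.takeWhile (fun c => c == 0) ++ p.reverse.dropWhile (fun c => c == 0)).reverse := by rw [h1]
    _ = pvStrip p ++ (p.reverse.takeWhile (fun c => c == 0)).reverse := by
          rw [List.reverse_append]; rfl
    _ = pvStrip p ++ List.replicate (p.reverse.takeWhile (fun c => c == 0)).length 0 := by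
          rw [h2]; simp

theorem pvVal_strip (p : List Int) : pvVal (pvStrip p) = pvVal p := by
  obtain ⟨t, ht⟩ := pvStrip_decomp p
  conv_rhs => rw [ht]
  rw [pvVal_append_zeros]

def pvBits01 (p : List Int) : Prop := ∀ c ∈ p, c = 0 ∨ c = 1

def pvStP (p : List Int) : Prop := ∀ c, p.getLast? = some c → c ≠ 0

theorem pvBits01_strip {p : List Int} (h : pvBits01 p) : pvBits01 (pvStrip p) := by
  intro c hc
  apply h
  have : c ∈ p.reverse.dropWhile (fun c => c == 0) := by simpa [pvStrip] using hc
  have : c ∈ p.reverse := (List.dropWhile_sublist (l := p.reverse) (p := fun c => c == 0)).mem this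
  simpa using this

theorem pvStP_strip (p : List Int) : pvStP (pvStrip p) := by
  intro c hc
  rw [pvStrip, List.getLast?_reverse] at hc
  have hne : p.reverse.dropWhile (fun c => c == 0) ≠ [] := by
    intro h; rw [h] at hc; simp at hc
  have hh := List.head_dropWhile_not (fun c => c == 0) hne
  rw [List.head?_eq_some_head hne] at hc
  have : (p.reverse.dropWhile (fun c => c == 0)).head hne = c := by
    injection hc
  rw [this] at hh
  simpa using hh

theorem pvGetLast?_cons_ne {c : Int} {t : List Int} (h : t ≠ []) :
    (c :: t).getLast? = t.getLast? := by
  cases t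
  · simp at h
  · simp [List.getLast?_cons]

theorem pvVal_lt {p : List Int} (h : pvBits01 p) : pvVal p < 2 ^ p.length := by
  induction p with
  | nil => simp [pvVal]
  | cons c t ih =>
    have hc := h c (by simp)
    have ht : pvBits01 t := fun d hd => h d (by simp [hd])
    have := ih ht
    have hcn : c.toNat ≤ 1 := by rcases hc with h | h <;> simp [h]
    simp only [pvVal, List.length_cons, pow_succ]
    omega

theorem pvLe_val {p : List Int} (h : pvBits01 p) (hs : pvStP p) (hne : p ≠ []) :
    2 ^ (p.length - 1) ≤ pvVal p := by
  induction p with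
  | nil => simp at hne
  | cons c t ih =>
    by_cases hte : t = []
    · subst hte
      have := hs c (by simp)
      have hc := h c (by simp)
      have hc1 : c = 1 := by
        rcases hc with rfl | rfl
        · exact absurd rfl this
        · rfl
      simp [hc1, pvVal]
    · have ht : pvBits01 t := fun d hd => h d (by simp [hd])
      have hst : pvStP t := by
        intro d hd
        exact hs d (by rwa [pvGetLast?_cons_ne hte])
      have := ih ht hst hte
      have hlen : t.length ≥ 1 := by
        cases t
        · simp at hte
        · simp
      simp only [pvVal, List.length_cons]
      have : 2 ^ (t.length + 1 - 1) = 2 * 2 ^ (t.length - 1) := by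
        rw [Nat.add_sub_cancel]
        conv_lhs => rw [← Nat.sub_add_cancel hlen]
        rw [pow_succ]; ring
      rw [this]
      omega

theorem pvSize_val {p : List Int} (h : pvBits01 p) (hs : pvStP p) :
    (pvVal p).size = p.length := by
  by_cases hne : p = []
  · subst hne; simp [pvVal, Nat.size_zero]
  · have h1 := pvVal_lt h
    have h2 := pvLe_val h hs hne
    have hlen : 1 ≤ p.length := by
      cases p
      · simp at hne
      · simp
    have hu : (pvVal p).size ≤ p.length := Nat.size_le.mpr h1
    have hl : p.length - 1 < (pvVal p).size := Nat.lt_size.mpr h2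
    omega

theorem pvXorPair (a b x y : Nat) (ha : a < 2) (hb : b < 2) :
    (a + 2 * x) ^^^ (b + 2 * y) = (a ^^^ b) + 2 * (x ^^^ y) := by
  have h2 : ((a + 2 * x) ^^^ (b + 2 * y)) / 2 = x ^^^ y := by
    rw [Nat.xor_div_two]; congr 1 <;> omega
  have h1 : ((a + 2 * x) ^^^ (b + 2 * y)) % 2 = (a ^^^ b) % 2 := by
    rw [Nat.xor_mod_two_eq, Nat.xor_mod_two_eq]
    omega
  have hab : a ^^^ b < 2 := by interval_cases a <;> interval_cases b <;> decide
  omega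

theorem pvBxor_bit {a b : Int} (ha : a = 0 ∨ a = 1) (hb : b = 0 ∨ b = 1) :
    (PySem.Int.bxor a b = 0 ∨ PySem.Int.bxor a b = 1)
    ∧ (PySem.Int.bxor a b).toNat = a.toNat ^^^ b.toNat := by
  rcases ha with rfl | rfl <;> rcases hb with rfl | rfl <;> exact ⟨by decide, by decide⟩

theorem pvVal_zipWith_xor {p d : List Int} (hp : pvBits01 p) (hd : pvBits01 d)
    (hl : p.length = d.length) :
    pvVal (pvXorStep p d) = pvVal p ^^^ pvVal d ∧ pvBits01 (pvXorStep p d) := by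
  induction p generalizing d with
  | nil =>
    cases d
    · exact ⟨by simp [pvXorStep, pvVal], by intro c hc; simp [pvXorStep] at hc⟩
    · simp at hl
  | cons c t ih =>
    cases d with
    | nil => simp at hl
    | cons e s =>
      have hc := hp c (by simp)
      have he := hd e (by simp)
      have ht : pvBits01 t := fun z hz => hp z (by simp [hz])
      have hs : pvBits01 s := fun z hz => hd z (by simp [hz])
      obtain ⟨ihv, ihb⟩ := ih ht hs (by simpa using hl)
      obtain ⟨hbit, hval⟩ := pvBxor_bit hc he
      constructor
      · show pvVal (PySem.Int.bxor c e :: pvXorStep t s) = _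
        have hcn : c.toNat < 2 := by rcases hc with rfl | rfl <;> decide
        have hen : e.toNat < 2 := by rcases he with rfl | rfl <;> decide
        simp only [pvVal, ihv, hval]
        exact (pvXorPair _ _ _ _ hcn hen).symm
      · intro z hz
        rcases (by simpa [pvXorStep] using hz : z = PySem.Int.bxor c e ∨ z ∈ pvXorStep t s) with rfl | hz'
        · exact hbit
        · exact ihb z hz'

theorem pvVal_replicate_append (d : Nat) (m : List Int) :
    pvVal (List.replicate d 0 ++ m) = pvVal m <<< d := by
  induction d with
  | zero => simp [Nat.shiftLeft_eq]
  | succ n ih =>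
    rw [List.replicate_succ]
    show pvVal (0 :: (List.replicate n 0 ++ m)) = _
    simp only [pvVal, ih, Nat.shiftLeft_eq]
    ring_nf
    omega

theorem pvBits_val {p : List Int} (h : pvBits01 p) (hs : pvStP p) :
    pvBits (pvVal p) = p := by
  induction p with
  | nil => rw [pvBits]; simp [pvVal]
  | cons c t ih =>
    have hc := h c (by simp)
    have ht : pvBits01 t := fun z hz => h z (by simp [hz])
    by_cases hte : t = []
    · subst hte
      have hc1 : c = 1 := by
        have := hs c (by simp)
        rcases hc with rfl | rfl
        · exact absurd rfl this
        · rfl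
      subst hc1
      rw [pvBits]
      norm_num [pvVal]
      rw [pvBits]
      simp
    · have hst : pvStP t := fun d hd => hs d (by rwa [pvGetLast?_cons_ne hte])
      have hpos : 1 ≤ pvVal t := by
        have := pvLe_val ht hst hte
        have : 1 ≤ 2 ^ (t.length - 1) := Nat.one_le_two_pow
        omega
      have hcn : c.toNat < 2 := by rcases hc with rfl | rfl <;> decide
      have hne : pvVal (c :: t) ≠ 0 := by simp only [pvVal]; omega
      rw [pvBits]
      rw [dif_neg hne]
      have hmod : pvVal (c :: t) % 2 = c.toNat := by simp only [pvVal]; omega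
      have hdiv : pvVal (c :: t) / 2 = pvVal t := by simp only [pvVal]; omega
      rw [hmod, hdiv, ih ht hst]
      congr 1
      rcases hc with rfl | rfl <;> simp

theorem pvOrModTwo (a b : Nat) : (a ||| b) % 2 = a % 2 ||| b % 2 := by
  have := Nat.or_mod_two_pow (a := a) (b := b) (n := 1)
  simpa using this

theorem pvOr_two_pow {a i : Nat} (h : a < 2 ^ i) : a ||| (1 <<< i) = a + 2 ^ i := by
  rw [Nat.shiftLeft_eq, one_mul]
  induction i generalizing a with
  | zero =>
    interval_cases a
    decide
  | succ n ih =>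
    have hd : a / 2 < 2 ^ n := by
      rw [pow_succ] at h; omega
    have hmod : (a ||| 2 ^ (n+1)) % 2 = a % 2 := by
      rw [pvOrModTwo]
      have : 2 ^ (n+1) % 2 = 0 := by
        rw [pow_succ]; omega
      simp [this]
    have hdiv : (a ||| 2 ^ (n+1)) / 2 = a / 2 + 2 ^ n := by
      rw [Nat.or_div_two]
      have : 2 ^ (n+1) / 2 = 2 ^ n := by rw [pow_succ]; omega
      rw [this, ih hd]
    have := Nat.mod_two_eq_zero_or_one a
    have hp : 2 ^ (n+1) = 2 * 2 ^ n := by ring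
    omega

theorem pvMaskFold (p : List Int) : ∀ (i acc : Nat), pvBits01 p → acc < 2 ^ i →
    ((p.zipIdx i).foldl (fun (m : Nat) (ci : Int × Nat) => if ci.1 ≠ 0 then m ||| (1 <<< ci.2) else m) acc)
      = acc + pvVal p * 2 ^ i := by
  induction p with
  | nil => intro i acc _ _; simp [pvVal]
  | cons c t ih =>
    intro i acc hb hacc
    have hc := hb c (by simp)
    have ht : pvBits01 t := fun z hz => hb z (by simp [hz])
    rw [List.zipIdx_cons, List.foldl_cons]
    rcases hc with rfl | rfl
    · simp only [ne_eq, not_true_eq_false, if_false, reduceIte]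
      rw [ih (i+1) acc ht (lt_of_lt_of_le hacc (by
        have : (2:Nat) ^ i ≤ 2 ^ (i+1) := Nat.pow_le_pow_right (by omega) (by omega)
        omega))]
      have h2 : (2:Nat) ^ (i+1) = 2 * 2 ^ i := by ring
      simp only [pvVal, Int.toNat_zero, h2]
      ring
    · simp only [ne_eq, one_ne_zero, not_false_eq_true, if_true, reduceIte]
      rw [pvOr_two_pow hacc]
      rw [ih (i+1) (acc + 2 ^ i) ht (by rw [pow_succ]; omega)]
      have h2 : (2:Nat) ^ (i+1) = 2 * 2 ^ i := by ring
      simp only [pvVal, Int.toNat_one, h2]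
      ring

theorem pvMask_eq_val {p : List Int} (h : pvBits01 p) : pvMask p = pvVal p := by
  have := pvMaskFold p 0 0 h (by norm_num)
  simpa [pvMask] using this

def pvXorAt : List Int → Nat → List Int → List Int
  | res, _, [] => res
  | [], _, _ => []
  | r :: res, 0, x :: bs => PySem.Int.bxor r x :: pvXorAt res 0 bs
  | r :: res, o+1, bs => r :: pvXorAt res o bs

theorem pvXorAt_length (res : List Int) : ∀ o bs, (pvXorAt res o bs).length = res.length := by
  induction res with
  | nil => intro o bs; cases bs <;> cases o <;> rfl
  | cons r res ih =>
    intro o bs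
    cases bs with
    | nil => rfl
    | cons x bs' =>
      cases o with
      | zero => simp [pvXorAt, ih]
      | succ o' => simp [pvXorAt, ih]

theorem pvXorAt_bits01 {res : List Int} (hres : pvBits01 res) :
    ∀ o {bs : List Int}, pvBits01 bs → pvBits01 (pvXorAt res o bs) := by
  induction res with
  | nil => intro o bs _; cases bs <;> cases o <;> simpa [pvXorAt] using hres
  | cons r res ih =>
    intro o bs hbs
    have hr := hres r (by simp)
    have hres' : pvBits01 res := fun z hz => hres z (by simp [hz])
    cases bs with
    | nil => simpa [pvXorAt] using hres
    | cons x bs' =>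
      have hx := hbs x (by simp)
      have hbs' : pvBits01 bs' := fun z hz => hbs z (by simp [hz])
      cases o with
      | zero =>
        intro z hz
        rcases (by simpa [pvXorAt] using hz : z = PySem.Int.bxor r x ∨ z ∈ pvXorAt res 0 bs') with rfl | hz'
        · exact (pvBxor_bit hr hx).1
        · exact ih hres' 0 hbs' z hz'
      | succ o' =>
        intro z hz
        rcases (by simpa [pvXorAt] using hz : z = r ∨ z ∈ pvXorAt res o' (x :: bs')) with rfl | hz'
        · exact hr
        · exact ih hres' o' hbs z hz'

theorem pvXorAt_val {res : List Int} (hres : pvBits01 res) :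
    ∀ o {bs : List Int}, pvBits01 bs → o + bs.length ≤ res.length →
      pvVal (pvXorAt res o bs) = pvVal res ^^^ (pvVal bs <<< o) := by
  induction res with
  | nil =>
    intro o bs hbs hle
    have : bs = [] := by
      cases bs
      · rfl
      · simp at hle
    subst this
    cases o <;> simp [pvXorAt, pvVal]
  | cons r res ih =>
    intro o bs hbs hle
    have hr := hres r (by simp)
    have hres' : pvBits01 res := fun z hz => hres z (by simp [hz])
    cases bs with
    | nil => simp [pvXorAt, pvVal, Nat.shiftLeft_eq]
    | cons x bs' =>
      have hx := hbs x (by simp)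
      have hbs' : pvBits01 bs' := fun z hz => hbs z (by simp [hz])
      have hrn : r.toNat < 2 := by rcases hr with rfl | rfl <;> decide
      have hxn : x.toNat < 2 := by rcases hx with rfl | rfl <;> decide
      cases o with
      | zero =>
        show pvVal (PySem.Int.bxor r x :: pvXorAt res 0 bs') = _
        simp only [pvVal]
        rw [(pvBxor_bit hr hx).2, ih hres' 0 hbs' (by simpa using hle)]
        simp only [Nat.shiftLeft_eq, pow_zero, mul_one]
        exact (pvXorPair _ _ _ _ hrn hxn).symm
      | succ o' =>
        show pvVal (r :: pvXorAt res o' (x :: bs')) = _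
        rw [show pvVal (r :: pvXorAt res o' (x :: bs'))
              = r.toNat + 2 * pvVal (pvXorAt res o' (x :: bs')) from rfl]
        rw [ih hres' o' hbs (by simp at hle ⊢; omega)]
        have : pvVal (x :: bs') <<< (o' + 1) = 2 * (pvVal (x :: bs') <<< o') := by
          simp only [Nat.shiftLeft_eq, pow_succ]; ring
        rw [this]
        have := pvXorPair r.toNat 0 (pvVal res) (pvVal (x :: bs') <<< o') hrn (by omega)
        simpa using this.symm

theorem pvXorAt_nilbs : ∀ (res : List Int) (o : Nat), pvXorAt res o [] = res := by
  intro res o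
  cases res
  · cases o <;> rfl
  · cases o <;> rfl

theorem pvXorAt_set : ∀ (o : Nat) (res : List Int) (b : Int) (bs : List Int), o < res.length →
    pvXorAt res o (b :: bs)
      = pvXorAt (res.set o (PySem.Int.bxor (res.getD o 0) b)) (o + 1) bs := by
  intro o
  induction o with
  | zero =>
    intro res b bs h
    cases res with
    | nil => simp at h
    | cons r res' =>
      cases bs with
      | nil => simp [pvXorAt, List.getD]
      | cons y ys => simp [pvXorAt, List.getD]
  | succ o' ih =>
    intro res b bs h
    cases res with
    | nil => simp at h
    | cons r res' =>
      have h' : o' < res'.length := by simpa using h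
      show r :: pvXorAt res' o' (b :: bs) = _
      rw [ih res' b bs h']
      have hset : (r :: res').set (o' + 1) (PySem.Int.bxor ((r :: res').getD (o' + 1) 0) b)
          = r :: res'.set o' (PySem.Int.bxor (res'.getD o' 0) b) := by
        simp [List.getD]
      rw [hset]
      cases bs with
      | nil => rw [pvXorAt_nilbs, pvXorAt_nilbs]
      | cons y ys => rfl

theorem pvInnerFold (ca : Int) (i : Nat) :
    ∀ (bs : List Int) (j : Nat) (res : List Int), i + j + bs.length ≤ res.length →
      ((bs.zipIdx j).foldl (fun r (cj : Int × Nat) =>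
        r.set (i + cj.2) (PySem.Int.bxor (r.getD (i + cj.2) 0) (PySem.Int.band ca cj.1))) res)
      = pvXorAt res (i + j) (bs.map (fun c => PySem.Int.band ca c)) := by
  intro bs
  induction bs with
  | nil =>
    intro j res _
    simp [List.zipIdx, pvXorAt_nilbs]
  | cons b bs' ih =>
    intro j res hle
    rw [List.zipIdx_cons, List.foldl_cons, List.map_cons]
    rw [pvXorAt_set (i + j) res _ _ (by simp at hle; omega)]
    have := ih (j + 1) (res.set (i + j) (PySem.Int.bxor (res.getD (i + j) 0) (PySem.Int.band ca b)))
      (by simp at hle ⊢; omega)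
    rw [show i + (j + 1) = i + j + 1 from by omega] at this
    exact this

def pvGA (b : Nat) : List Int → Nat → Nat → Nat
  | [], _, acc => acc
  | c :: t, s, acc => pvGA b t (s + 1) (if c = 1 then acc ^^^ (b <<< s) else acc)

theorem pvGA_zero (b : Nat) : ∀ (a : List Int) (s acc : Nat), pvBits01 a → pvVal a = 0 →
    pvGA b a s acc = acc := by
  intro a
  induction a with
  | nil => intro s acc _ _; rfl
  | cons c t ih =>
    intro s acc hb hv
    have hc := hb c (by simp)
    have ht : pvBits01 t := fun z hz => hb z (by simp [hz])
    have hcn : c.toNat < 2 := by rcases hc with rfl | rfl <;> decide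
    simp only [pvVal] at hv
    have hc0 : c.toNat = 0 := by omega
    have hc0' : c = 0 := by
      rcases hc with rfl | rfl
      · rfl
      · simp at hc0
    show pvGA b t (s+1) (if c = 1 then acc ^^^ (b <<< s) else acc) = acc
    rw [hc0']
    simp only [if_neg (by norm_num : ¬ (0:Int) = 1)]
    exact ih (s+1) acc ht (by omega)

theorem pvClmulGo_eq_GA (b : Nat) : ∀ (a : List Int) (s acc : Nat), pvBits01 a →
    pvClmulGo (pvVal a) b s acc = pvGA b a s acc := by
  intro a
  induction a with
  | nil => intro s acc _; rw [pvClmulGo]; rfl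
  | cons c t ih =>
    intro s acc hb
    have hc := hb c (by simp)
    have ht : pvBits01 t := fun z hz => hb z (by simp [hz])
    have hcn : c.toNat < 2 := by rcases hc with rfl | rfl <;> decide
    by_cases hv : pvVal (c :: t) = 0
    · rw [hv, pvClmulGo]
      simp only [if_pos rfl]
      exact (pvGA_zero b (c :: t) s acc hb hv).symm
    · rw [pvClmulGo, dif_neg hv]
      have hmod : pvVal (c :: t) % 2 = c.toNat := by simp only [pvVal]; omega
      have hdiv : pvVal (c :: t) / 2 = pvVal t := by simp only [pvVal]; omega
      rw [hmod, hdiv]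
      have hif : (if c.toNat = 1 then acc ^^^ (b <<< s) else acc)
          = (if c = 1 then acc ^^^ (b <<< s) else acc) := by
        rcases hc with rfl | rfl <;> simp
      show pvClmulGo (pvVal t) b (s+1) (if c.toNat = 1 then acc ^^^ (b <<< s) else acc)
          = pvGA b t (s+1) (if c = 1 then acc ^^^ (b <<< s) else acc)
      rw [hif]
      exact ih (s+1) _ ht

theorem pvVal_map_band {ca : Int} (hca : ca = 0 ∨ ca = 1) {b : List Int} (hb : pvBits01 b) :
    pvVal (b.map (fun c => PySem.Int.band ca c)) = (if ca = 1 then pvVal b else 0)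
    ∧ pvBits01 (b.map (fun c => PySem.Int.band ca c)) := by
  induction b with
  | nil => constructor <;> simp [pvVal] <;> intro z hz <;> simp at hz
  | cons c t ih =>
    have hc := hb c (by simp)
    have ht : pvBits01 t := fun z hz => hb z (by simp [hz])
    obtain ⟨ihv, ihb⟩ := ih ht
    constructor
    · show pvVal (PySem.Int.band ca c :: t.map _) = _
      simp only [pvVal, ihv]
      rcases hca with rfl | rfl <;> rcases hc with rfl | rfl <;> simp [pvVal] <;> decide
    · intro z hz
      rcases (by simpa using hz : z = PySem.Int.band ca c ∨ z ∈ t.map (fun c => PySem.Int.band ca c)) with rfl | hz'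
      · rcases hca with rfl | rfl <;> rcases hc with rfl | rfl <;> [left; left; left; right] <;> decide
      · exact ihb z hz'

theorem pvOuterFold (b : List Int) (hb : pvBits01 b) :
    ∀ (a : List Int) (i0 : Nat) (res : List Int), pvBits01 a → pvBits01 res →
      i0 + a.length + b.length ≤ res.length + 1 →
      pvVal ((a.zipIdx i0).foldl (fun res (ci : Int × Nat) =>
          (b.zipIdx).foldl (fun r (cj : Int × Nat) =>
            r.set (ci.2 + cj.2) (PySem.Int.bxor (r.getD (ci.2 + cj.2) 0) (PySem.Int.band ci.1 cj.1))) res) res)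
        = pvGA (pvVal b) a i0 (pvVal res)
      ∧ pvBits01 ((a.zipIdx i0).foldl (fun res (ci : Int × Nat) =>
          (b.zipIdx).foldl (fun r (cj : Int × Nat) =>
            r.set (ci.2 + cj.2) (PySem.Int.bxor (r.getD (ci.2 + cj.2) 0) (PySem.Int.band ci.1 cj.1))) res) res) := by
  intro a
  induction a with
  | nil => intro i0 res _ hres _; exact ⟨rfl, hres⟩
  | cons ca t ih =>
    intro i0 res ha2 hres hle
    have hca := ha2 ca (by simp)
    have ht : pvBits01 t := fun z hz => ha2 z (by simp [hz])
    rw [List.zipIdx_cons, List.foldl_cons]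
    have hinner := pvInnerFold ca i0 b 0 res (by simp at hle ⊢; omega)
    simp only [Nat.add_zero] at hinner
    have hres1 : pvBits01 (pvXorAt res i0 (b.map (fun c => PySem.Int.band ca c))) :=
      pvXorAt_bits01 hres i0 (pvVal_map_band hca hb).2
    have hlen1 : (pvXorAt res i0 (b.map (fun c => PySem.Int.band ca c))).length = res.length :=
      pvXorAt_length res i0 _
    obtain ⟨ihv, ihb⟩ := ih (i0 + 1) _ ht hres1 (by rw [hlen1]; simp at hle ⊢; omega)
    rw [hinner]
    refine ⟨?_, ihb⟩
    rw [ihv]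
    have hvx : pvVal (pvXorAt res i0 (b.map (fun c => PySem.Int.band ca c)))
        = pvVal res ^^^ ((if ca = 1 then pvVal b else 0) <<< i0) := by
      rw [pvXorAt_val hres i0 (pvVal_map_band hca hb).2 (by simp at hle ⊢; omega),
        (pvVal_map_band hca hb).1]
    rw [hvx]
    show pvGA (pvVal b) t (i0+1) _ = pvGA (pvVal b) t (i0+1) (if ca = 1 then pvVal res ^^^ (pvVal b <<< i0) else pvVal res)
    congr 1
    rcases hca with rfl | rfl <;> simp

theorem pvBits01_replicate (n : Nat) : pvBits01 (List.replicate n (0:Int)) := by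
  intro c hc
  left
  exact (List.eq_of_mem_replicate hc)

theorem pvMul_val {a b : List Int} (ha : pvBits01 a) (hb : pvBits01 b) :
    pvVal (pvGf2Mul a b) = pvClmul (pvVal a) (pvVal b) ∧ pvBits01 (pvGf2Mul a b) := by
  have h0 : pvBits01 (List.replicate (a.length + b.length - 1) (0:Int)) := pvBits01_replicate _
  obtain ⟨hv, hbits⟩ := pvOuterFold b hb a 0 (List.replicate (a.length + b.length - 1) 0) ha h0
    (by simp; omega)
  refine ⟨?_, hbits⟩
  rw [show pvGf2Mul a b = (a.zipIdx).foldl (fun res (ci : Int × Nat) =>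
      (b.zipIdx).foldl (fun r (cj : Int × Nat) =>
        r.set (ci.2 + cj.2) (PySem.Int.bxor (r.getD (ci.2 + cj.2) 0) (PySem.Int.band ci.1 cj.1))) res)
      (List.replicate (a.length + b.length - 1) 0) from rfl]
  rw [hv, pvVal_replicate, pvClmul]
  exact (pvClmulGo_eq_GA (pvVal b) a 0 0 ha).symm

theorem pvLast_one {p : List Int} (h : pvBits01 p) (hs : pvStP p) (hne : p ≠ []) :
    p.getLast? = some 1 := by
  have hsome : p.getLast? = some (p.getLast hne) := List.getLast?_eq_some_getLast hne
  have hcz := hs _ hsome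
  have hcm : p.getLast hne ∈ p := List.getLast_mem hne
  rcases h _ hcm with h0 | h1
  · exact absurd h0 hcz
  · rw [hsome, h1]

theorem pvStrip_length_lt {l : List Int} (h : l.getLast? = some 0) :
    (pvStrip l).length < l.length := by
  have hh : l.reverse.head? = some 0 := by rwa [List.head?_reverse]
  obtain ⟨t, ht⟩ : ∃ t, l.reverse = 0 :: t := by
    cases hr : l.reverse with
    | nil => rw [hr] at hh; simp at hh
    | cons a t =>
      rw [hr] at hh
      simp at hh
      exact ⟨t, by rw [hh]⟩
  have : pvStrip l = (t.dropWhile (fun c => c == 0)).reverse := by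
    rw [pvStrip, ht]
    simp [List.dropWhile_cons]
  rw [this]
  have h1 : (t.dropWhile (fun c => c == 0)).length ≤ t.length := List.length_dropWhile_le _ _
  have h2 : l.length = t.length + 1 := by
    have := congrArg List.length ht
    simpa using this
  simp only [List.length_reverse]
  omega

theorem pvGetLast?_eq_getElem? (l : List Int) : l.getLast? = l[l.length - 1]? := by
  exact List.getLast?_eq_getElem?

theorem pvModCore {m : List Int} (hm : pvBits01 m) (hsm : pvStP m) (hmne : m ≠ []) :
    ∀ (n : Nat) (p : List Int), p.length ≤ n → pvBits01 p → pvStP p →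
    ∀ f g, p.length < f → p.length < g →
      pvVal (pvModLoop f p m) = pvReduceGo g (pvVal p) (pvVal m)
      ∧ pvBits01 (pvModLoop f p m) ∧ pvStP (pvModLoop f p m) := by
  intro n
  induction n with
  | zero =>
    intro p hpn hp hsp f g hf hg
    have hpe : p = [] := by
      cases p
      · rfl
      · simp at hpn
    subst hpe
    obtain ⟨f', rfl⟩ : ∃ f', f = f' + 1 := ⟨f - 1, by omega⟩
    obtain ⟨g', rfl⟩ : ∃ g', g = g' + 1 := ⟨g - 1, by omega⟩
    have hml : 1 ≤ m.length := by
      cases m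
      · simp at hmne
      · simp
    rw [pvModLoop, pvReduceGo]
    rw [if_neg (by simp; omega)]
    rw [if_neg (by
      rw [pvSize_val hm hsm, pvSize_val hp hsp]
      simpa using by omega)]
    exact ⟨rfl, hp, hsp⟩
  | succ n ih =>
    intro p hpn hp hsp f g hf hg
    obtain ⟨f', rfl⟩ : ∃ f', f = f' + 1 := ⟨f - 1, by omega⟩
    obtain ⟨g', rfl⟩ : ∃ g', g = g' + 1 := ⟨g - 1, by omega⟩
    have hml : 1 ≤ m.length := by
      cases m
      · simp at hmne
      · simp
    rw [pvModLoop, pvReduceGo]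
    rw [pvSize_val hm hsm, pvSize_val hp hsp]
    by_cases hc : m.length ≤ p.length
    · rw [if_pos (by push_cast; omega), if_pos hc]
      have hpne : p ≠ [] := by
        intro h
        subst h
        rw [List.length_nil] at hc
        omega
      set d := p.length - m.length with hd
      set diff := List.replicate d (0:Int) ++ m with hdiff
      have hdlen : diff.length = p.length := by
        simp [hdiff, hd]
        omega
      have hdbits : pvBits01 diff := by
        intro c hcm
        rcases List.mem_append.mp hcm with h1 | h2
        · exact Or.inl (List.eq_of_mem_replicate h1)
        · exact hm c h2
      obtain ⟨hxv, hxb⟩ := pvVal_zipWith_xor hp hdbits hdlen.symm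
      have hdval : pvVal diff = pvVal m <<< (p.length - m.length) := pvVal_replicate_append d m
      have hplen : 1 ≤ p.length := by
        cases p
        · simp at hpne
        · simp
      have hlast : (pvXorStep p diff).getLast? = some 0 := by
        have hxlen : (pvXorStep p diff).length = p.length := by
          simp [pvXorStep, hdlen]
        rw [pvGetLast?_eq_getElem?, hxlen]
        have hgp : p[p.length - 1]? = some 1 := by
          have := pvLast_one hp hsp hpne
          rwa [pvGetLast?_eq_getElem?] at this
        have hgd : diff[p.length - 1]? = some 1 := by
          have hmlast : m[m.length - 1]? = some 1 := by
            have := pvLast_one hm hsm hmne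
            rwa [pvGetLast?_eq_getElem?] at this
          rw [hdiff, List.getElem?_append_right (by simp; omega), List.length_replicate,
            show p.length - 1 - d = m.length - 1 from by omega]
          exact hmlast
        simp only [pvXorStep, List.getElem?_zipWith, hgp, hgd]
        decide
      set q := pvStrip (pvXorStep p diff) with hq
      have hqb : pvBits01 q := pvBits01_strip hxb
      have hqs : pvStP q := pvStP_strip _
      have hqv : pvVal q = pvVal p ^^^ (pvVal m <<< (p.length - m.length)) := by
        rw [hq, pvVal_strip, hxv, hdval]
      have hqlen : q.length < p.length := by
        have h1 := pvStrip_length_lt hlast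
        have h2 : (pvXorStep p diff).length = p.length := by simp [pvXorStep, hdlen]
        rw [hq]
        omega
      obtain ⟨v, b2, s2⟩ := ih q (by omega) hqb hqs f' g' (by omega) (by omega)
      rw [← hqv]
      exact ⟨v, b2, s2⟩
    · rw [if_neg (by push_cast; omega), if_neg (by omega)]
      exact ⟨rfl, hp, hsp⟩

theorem pvOneMem_strip {m : List Int} (h1 : (1:Int) ∈ m) : (1:Int) ∈ pvStrip m := by
  obtain ⟨t, ht⟩ := pvStrip_decomp m
  rw [ht] at h1
  rcases List.mem_append.mp h1 with h | h
  · exact h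
  · exact absurd (List.eq_of_mem_replicate h) (by norm_num)

theorem pvGf2Mod_val {p m : List Int} (hp : pvBits01 p) (hm : pvBits01 m) (h1 : (1:Int) ∈ m) :
    pvVal (pvGf2Mod p m) = pvReduce (pvVal p) (pvVal m)
    ∧ pvBits01 (pvGf2Mod p m) ∧ pvStP (pvGf2Mod p m) := by
  have hms : pvBits01 (pvStrip m) := pvBits01_strip hm
  have hmss : pvStP (pvStrip m) := pvStP_strip m
  have hmne : pvStrip m ≠ [] := by
    intro h
    have := pvOneMem_strip h1
    rw [h] at this
    simp at this
  have hps : pvBits01 (pvStrip p) := pvBits01_strip hp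
  have hpss : pvStP (pvStrip p) := pvStP_strip p
  have hsz : (pvVal p).size = (pvStrip p).length := by
    rw [← pvVal_strip p]
    exact pvSize_val hps hpss
  obtain ⟨v, b2, s2⟩ := pvModCore hms hmss hmne (pvStrip p).length (pvStrip p) le_rfl hps hpss
    ((pvStrip p).length + 1) ((pvStrip p).length + 1) (by omega) (by omega)
  refine ⟨?_, b2, s2⟩
  rw [pvGf2Mod] at *
  rw [v, pvReduce, hsz, pvVal_strip, pvVal_strip]

theorem pvPow_val {mp : List Int} (hm : pvBits01 mp) (h1 : (1:Int) ∈ mp) :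
    ∀ (n : Nat) (k : Int), k.toNat ≤ n → ∀ (r x : List Int), pvBits01 r → pvStP r → pvBits01 x →
      pvVal (pvPowLoopA k r x mp) = pvPowLoopB k (pvVal r) (pvVal x) (pvVal mp)
      ∧ pvBits01 (pvPowLoopA k r x mp) ∧ pvStP (pvPowLoopA k r x mp) := by
  intro n
  induction n with
  | zero =>
    intro k hk r x hr hsr hx
    have hknp : ¬ k > 0 := by omega
    rw [pvPowLoopA, pvPowLoopB, dif_neg hknp, dif_neg hknp]
    exact ⟨rfl, hr, hsr⟩
  | succ n ih =>
    intro k hk r x hr hsr hx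
    by_cases hkp : k > 0
    · rw [pvPowLoopA, pvPowLoopB, dif_pos hkp, dif_pos hkp]
      obtain ⟨hmulr, hmulrb⟩ := pvMul_val hr hx
      obtain ⟨hmodrv, hmodrb, hmodrs⟩ := pvGf2Mod_val hmulrb hm h1
      obtain ⟨hmulx, hmulxb⟩ := pvMul_val hx hx
      obtain ⟨hmodxv, hmodxb, hmodxs⟩ := pvGf2Mod_val hmulxb hm h1
      have hk2 : (PySem.Int.floordiv k 2).toNat ≤ n := by
        rw [PySem.Int.floordiv_eq_ediv_of_pos (by omega : (0:Int) < 2)]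
        omega
      by_cases hb : PySem.Int.mod k 2 == 1
      · rw [if_pos hb, if_pos hb]
        obtain ⟨v, b2, s2⟩ := ih (PySem.Int.floordiv k 2) hk2
          (pvGf2Mod (pvGf2Mul r x) mp) (pvGf2Mod (pvGf2Mul x x) mp) hmodrb hmodrs hmodxb
        refine ⟨?_, b2, s2⟩
        rw [v, hmodrv, hmodxv, hmulr, hmulx]
      · rw [if_neg (by simpa using hb), if_neg (by simpa using hb)]
        obtain ⟨v, b2, s2⟩ := ih (PySem.Int.floordiv k 2) hk2
          r (pvGf2Mod (pvGf2Mul x x) mp) hr hsr hmodxb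
        refine ⟨?_, b2, s2⟩
        rw [v, hmodxv, hmulx]
    · rw [pvPowLoopA, pvPowLoopB, dif_neg hkp, dif_neg hkp]
      exact ⟨rfl, hr, hsr⟩

-- ===== carryless-multiplication algebra (proof-only) =====

theorem pvXorCancelLeft (a b : Nat) : a ^^^ (a ^^^ b) = b := by
  rw [← Nat.xor_assoc, Nat.xor_self, Nat.zero_xor]

theorem pvTwoMulXorBit (x c : Nat) (hc : c < 2) : 2 * x ^^^ c = 2 * x + c := by
  have h2x : 2 * x / 2 = x := by omega
  have m1 : (2 * x ^^^ c) % 2 = c := by rw [Nat.xor_mod_two_eq]; omega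
  have m2 : (2 * x ^^^ c) / 2 = x := by
    rw [Nat.xor_div_two, h2x]
    rcases (by omega : c = 0 ∨ c = 1) with rfl | rfl <;> simp
  omega

theorem pvTwoMulOrBit (x c : Nat) (hc : c < 2) : 2 * x ||| c = 2 * x + c := by
  have h2x : 2 * x / 2 = x := by omega
  have m1 : (2 * x ||| c) % 2 = c := by
    rw [pvOrModTwo]
    have h0 : 2 * x % 2 = 0 := by omega
    rw [h0]
    rcases (by omega : c = 0 ∨ c = 1) with rfl | rfl <;> simp
  have m2 : (2 * x ||| c) / 2 = x := by
    rw [Nat.or_div_two, h2x]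
    rcases (by omega : c = 0 ∨ c = 1) with rfl | rfl <;> simp
  omega

def clm (a b : Nat) : Nat :=
  if h : a = 0 then 0
  else (if a % 2 = 1 then b else 0) ^^^ (clm (a / 2) b <<< 1)
termination_by a
decreasing_by exact Nat.div_lt_self (Nat.pos_of_ne_zero h) (by omega)

theorem clm_zero_left (b : Nat) : clm 0 b = 0 := by rw [clm]; simp

theorem clm_step {a : Nat} (h : a ≠ 0) (b : Nat) :
    clm a b = (if a % 2 = 1 then b else 0) ^^^ (clm (a / 2) b <<< 1) := by
  rw [clm]; rw [dif_neg h]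

theorem clm_two_mul_add (a b c : Nat) (hc : c < 2) :
    clm (2 * a + c) b = (if c = 1 then b else 0) ^^^ (clm a b <<< 1) := by
  by_cases h : 2 * a + c = 0
  · have ha : a = 0 := by omega
    have hcz : c = 0 := by omega
    subst ha; subst hcz
    simp [clm_zero_left, h]
  · rw [clm_step h]
    have h1 : (2 * a + c) % 2 = c := by omega
    have h2 : (2 * a + c) / 2 = a := by omega
    rw [h1, h2]

theorem clm_one_left (b : Nat) : clm 1 b = b := by
  rw [clm_step (by omega)]
  simp [clm_zero_left]

theorem clm_zero_right (a : Nat) : clm a 0 = 0 := by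
  induction a using Nat.strong_induction_on with
  | _ a ih =>
    by_cases h : a = 0
    · subst h; exact clm_zero_left 0
    · rw [clm_step h, ih (a / 2) (Nat.div_lt_self (Nat.pos_of_ne_zero h) (by omega))]
      simp

theorem clm_one_right (a : Nat) : clm a 1 = a := by
  induction a using Nat.strong_induction_on with
  | _ a ih =>
    by_cases h : a = 0
    · subst h; exact clm_zero_left 1
    · rw [clm_step h, ih (a / 2) (Nat.div_lt_self (Nat.pos_of_ne_zero h) (by omega))]
      have hx : (a / 2) <<< 1 = 2 * (a / 2) := by
        rw [Nat.shiftLeft_eq]; ring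
      rcases Nat.mod_two_eq_zero_or_one a with h0 | h1
      · rw [if_neg (by omega), hx, Nat.zero_xor]
        omega
      · rw [if_pos h1, hx, Nat.xor_comm, pvTwoMulXorBit _ 1 (by omega)]
        omega

theorem clm_shl_left (a b : Nat) : clm (a <<< 1) b = clm a b <<< 1 := by
  have : a <<< 1 = 2 * a + 0 := by rw [Nat.shiftLeft_eq]; ring
  rw [this, clm_two_mul_add a b 0 (by omega)]
  simp

theorem clm_rdistrib (a b c : Nat) : clm a (b ^^^ c) = clm a b ^^^ clm a c := by
  induction a using Nat.strong_induction_on with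
  | _ a ih =>
    by_cases h : a = 0
    · subst h; simp [clm_zero_left]
    · rw [clm_step h, clm_step h (b := b), clm_step h (b := c),
        ih (a / 2) (Nat.div_lt_self (Nat.pos_of_ne_zero h) (by omega))]
      rw [Nat.shiftLeft_xor_distrib]
      rcases Nat.mod_two_eq_zero_or_one a with h0 | h1
      · simp only [if_neg (show ¬ a % 2 = 1 from by omega)]
        simp [Nat.xor_assoc, Nat.xor_comm, Nat.xor_left_comm, Nat.xor_self, Nat.xor_zero,
          Nat.zero_xor, pvXorCancelLeft]
      · simp only [if_pos h1]
        simp [Nat.xor_assoc, Nat.xor_comm, Nat.xor_left_comm, Nat.xor_self, Nat.xor_zero,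
          Nat.zero_xor, pvXorCancelLeft]

theorem clm_ldistrib (a b c : Nat) : clm (a ^^^ b) c = clm a c ^^^ clm b c := by
  induction a using Nat.strong_induction_on generalizing b with
  | _ a ih =>
    by_cases ha : a = 0
    · subst ha; simp [clm_zero_left]
    · by_cases hab : a ^^^ b = 0
      · have : a = b := Nat.xor_eq_zero_iff.mp hab
        subst this
        rw [hab, clm_zero_left, Nat.xor_self]
      · by_cases hb : b = 0
        · subst hb
          simp [clm_zero_left]
        · rw [clm_step hab, clm_step ha, clm_step hb]
          have hdiv : (a ^^^ b) / 2 = a / 2 ^^^ b / 2 := Nat.xor_div_two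
          rw [hdiv, ih (a / 2) (Nat.div_lt_self (Nat.pos_of_ne_zero ha) (by omega)) (b / 2)]
          rw [Nat.shiftLeft_xor_distrib]
          have hxm : (a ^^^ b) % 2 = (a + b) % 2 := Nat.xor_mod_two_eq
          rcases Nat.mod_two_eq_zero_or_one a with h0 | h1 <;>
            rcases Nat.mod_two_eq_zero_or_one b with g0 | g1
          · simp only [if_neg (show ¬ a % 2 = 1 from by omega),
              if_neg (show ¬ b % 2 = 1 from by omega),
              if_neg (show ¬ (a ^^^ b) % 2 = 1 from by omega)]
            simp [Nat.xor_assoc, Nat.xor_comm, Nat.xor_left_comm, Nat.xor_self, Nat.xor_zero,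
              Nat.zero_xor, pvXorCancelLeft]
          · simp only [if_neg (show ¬ a % 2 = 1 from by omega), if_pos g1,
              if_pos (show (a ^^^ b) % 2 = 1 from by omega)]
            simp [Nat.xor_assoc, Nat.xor_comm, Nat.xor_left_comm, Nat.xor_self, Nat.xor_zero,
              Nat.zero_xor, pvXorCancelLeft]
          · simp only [if_pos h1, if_neg (show ¬ b % 2 = 1 from by omega),
              if_pos (show (a ^^^ b) % 2 = 1 from by omega)]
            simp [Nat.xor_assoc, Nat.xor_comm, Nat.xor_left_comm, Nat.xor_self, Nat.xor_zero,
              Nat.zero_xor, pvXorCancelLeft]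
          · simp only [if_pos h1, if_pos g1,
              if_neg (show ¬ (a ^^^ b) % 2 = 1 from by omega)]
            simp [Nat.xor_assoc, Nat.xor_comm, Nat.xor_left_comm, Nat.xor_self, Nat.xor_zero,
              Nat.zero_xor, pvXorCancelLeft]

theorem clm_shl_right (a b : Nat) : clm a (b <<< 1) = clm a b <<< 1 := by
  induction a using Nat.strong_induction_on with
  | _ a ih =>
    by_cases h : a = 0
    · subst h; simp [clm_zero_left]
    · rw [clm_step h, clm_step h (b := b),
        ih (a / 2) (Nat.div_lt_self (Nat.pos_of_ne_zero h) (by omega))]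
      rw [Nat.shiftLeft_xor_distrib]
      congr 1
      split <;> simp

theorem clm_comm (a b : Nat) : clm a b = clm b a := by
  induction b using Nat.strong_induction_on generalizing a with
  | _ b ih =>
    by_cases hb : b = 0
    · subst hb; rw [clm_zero_right, clm_zero_left]
    · rw [clm_step hb]
      have hsplit : b = (b % 2) ^^^ ((b / 2) <<< 1) := by
        have e1 : (b / 2) <<< 1 = 2 * (b / 2) := by rw [Nat.shiftLeft_eq]; ring
        rw [e1, Nat.xor_comm, pvTwoMulXorBit _ _ (by omega)]
        omega
      conv_lhs => rw [hsplit]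
      rw [clm_rdistrib, clm_shl_right, ih (b / 2) (Nat.div_lt_self (Nat.pos_of_ne_zero hb) (by omega))]
      congr 1
      rcases Nat.mod_two_eq_zero_or_one b with h0 | h1
      · rw [h0, if_neg (by omega), clm_zero_right]
      · rw [h1, if_pos rfl, clm_one_right]

theorem clm_assoc (a b c : Nat) : clm (clm a b) c = clm a (clm b c) := by
  induction a using Nat.strong_induction_on with
  | _ a ih =>
    by_cases h : a = 0
    · subst h; simp [clm_zero_left]
    · rw [clm_step h (b := b), clm_step h (b := clm b c), clm_ldistrib]
      congr 1
      · split
        · rfl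
        · exact clm_zero_left c
      · rw [clm_shl_left, ih (a / 2) (Nat.div_lt_self (Nat.pos_of_ne_zero h) (by omega))]

theorem clm_pow2 (s m : Nat) : clm (2 ^ s) m = m <<< s := by
  induction s with
  | zero => simpa using clm_one_left m
  | succ n ih =>
    have h2 : (2:Nat) ^ (n+1) = 2 * 2 ^ n + 0 := by ring
    rw [h2, clm_two_mul_add _ _ _ (by omega), ih, if_neg (by omega), Nat.zero_xor,
      ← Nat.shiftLeft_add]

-- bridge: the accumulator form used by the A-side model equals clm
theorem pvClmulGo_eq_clm : ∀ (a b s acc : Nat), pvClmulGo a b s acc = acc ^^^ (clm a b <<< s) := by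
  intro a
  induction a using Nat.strong_induction_on with
  | _ a ih =>
    intro b s acc
    by_cases h : a = 0
    · subst h
      rw [pvClmulGo, clm_zero_left]
      simp
    · rw [pvClmulGo, dif_neg h, ih (a / 2) (Nat.div_lt_self (Nat.pos_of_ne_zero h) (by omega)),
        clm_step h]
      rw [Nat.shiftLeft_xor_distrib]
      have hsh : clm (a / 2) b <<< 1 <<< s = clm (a / 2) b <<< (s + 1) := by
        rw [← Nat.shiftLeft_add, Nat.add_comm]
      rw [hsh]
      rcases Nat.mod_two_eq_zero_or_one a with h0 | h1
      · rw [if_neg (by omega), if_neg (by omega)]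
        simp [Nat.xor_assoc]
      · rw [if_pos h1, if_pos h1]
        simp [Nat.xor_assoc]

theorem pvClmul_eq_clm (a b : Nat) : pvClmul a b = clm a b := by
  rw [pvClmul, pvClmulGo_eq_clm]
  simp

-- ===== size lemmas =====

theorem pvSize_le_low (x : Nat) (h : x ≠ 0) : 2 ^ (x.size - 1) ≤ x := by
  have h1 : 0 < x.size := Nat.size_pos.mpr (Nat.pos_of_ne_zero h)
  exact Nat.lt_size.mp (by omega)

theorem pvShiftTop (x : Nat) (h : x ≠ 0) : x >>> (x.size - 1) = 1 := by
  have h1 := pvSize_le_low x h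
  have h2 : x < 2 ^ x.size := Nat.size_le.mp le_rfl
  have h3 : 0 < x.size := Nat.size_pos.mpr (Nat.pos_of_ne_zero h)
  have h4 : 2 ^ x.size = 2 ^ (x.size - 1) * 2 := by
    conv_lhs => rw [show x.size = (x.size - 1) + 1 from by omega]
    rw [pow_succ]
  rw [Nat.shiftRight_eq_div_pow]
  exact Nat.div_eq_of_lt_le (by omega) (by omega)

theorem pvShiftSmall (y k : Nat) (h : y.size ≤ k) : y >>> k = 0 := by
  have : y < 2 ^ k := lt_of_lt_of_le (Nat.size_le.mp le_rfl)
    (Nat.pow_le_pow_right (by omega) h)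
  rw [Nat.shiftRight_eq_div_pow]
  exact Nat.div_eq_of_lt this

theorem pvXor_size_eq {x y : Nat} (h : y.size < x.size) : (x ^^^ y).size = x.size := by
  have hx : x ≠ 0 := by
    intro hz; subst hz; simp [Nat.size_zero] at h
  have h3 : 0 < x.size := Nat.size_pos.mpr (Nat.pos_of_ne_zero hx)
  have hup : (x ^^^ y).size ≤ x.size := by
    apply Nat.size_le.mpr
    apply Nat.xor_lt_two_pow (Nat.size_le.mp le_rfl)
    exact lt_of_lt_of_le (Nat.size_le.mp le_rfl) (Nat.pow_le_pow_right (by omega) (by omega))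
  have hsr : (x ^^^ y) >>> (x.size - 1) = 1 := by
    rw [Nat.shiftRight_xor_distrib, pvShiftTop x hx, pvShiftSmall y (x.size - 1) (by omega)]
    decide
  have hdown : x.size - 1 < (x ^^^ y).size := by
    apply Nat.lt_size.mpr
    by_contra hnot
    push_neg at hnot
    rw [Nat.shiftRight_eq_div_pow, Nat.div_eq_of_lt hnot] at hsr
    omega
  omega

theorem pvXor_size_lt {x y : Nat} (hx : x ≠ 0) (h : x.size = y.size) :
    (x ^^^ y).size < x.size := by
  have h3 : 0 < x.size := Nat.size_pos.mpr (Nat.pos_of_ne_zero hx)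
  have hy : y ≠ 0 := by
    intro hz; subst hz; simp [Nat.size_zero] at h; omega
  have hsr : (x ^^^ y) >>> (x.size - 1) = 0 := by
    rw [Nat.shiftRight_xor_distrib, pvShiftTop x hx]
    rw [show x.size - 1 = y.size - 1 from by omega, pvShiftTop y hy]
    decide
  have hlt : x ^^^ y < 2 ^ (x.size - 1) := by
    rw [Nat.shiftRight_eq_div_pow] at hsr
    exact Nat.lt_of_div_eq_zero (Nat.two_pow_pos _) hsr
  have := Nat.size_le.mpr hlt
  omega

theorem clm_size_ge {q m : Nat} (hq : q ≠ 0) (hm : m ≠ 0) : m.size ≤ (clm q m).size := by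
  induction q using Nat.strong_induction_on with
  | _ q ih =>
    by_cases hq1 : q = 1
    · subst hq1; rw [clm_one_left]
    · have hq2 : 2 ≤ q := by omega
      have hdq : q / 2 ≠ 0 := by omega
      have ihs := ih (q / 2) (Nat.div_lt_self (by omega) (by omega)) hdq
      have hmsz : 0 < m.size := Nat.size_pos.mpr (Nat.pos_of_ne_zero hm)
      have hclm_ne : clm (q / 2) m ≠ 0 := by
        intro hz
        rw [hz, Nat.size_zero] at ihs
        omega
      have hsz : (clm (q / 2) m <<< 1).size = (clm (q / 2) m).size + 1 :=
        Nat.size_shiftLeft hclm_ne 1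
      rw [clm_step hq]
      rcases Nat.mod_two_eq_zero_or_one q with h0 | h1
      · rw [if_neg (by omega), Nat.zero_xor, hsz]
        omega
      · rw [if_pos h1]
        rw [Nat.xor_comm]
        have hlt : m.size < (clm (q / 2) m <<< 1).size := by rw [hsz]; omega
        rw [pvXor_size_eq hlt, hsz]
        omega

-- ===== canonical remainder characterization =====

theorem pvReduceGo_fixed {p m : Nat} (h : p.size < m.size) : ∀ f, pvReduceGo f p m = p := by
  intro f
  cases f with
  | zero => rfl
  | succ f' =>
    rw [pvReduceGo, if_neg (by omega)]

theorem pvReduceGo_spec {m : Nat} (hm : m ≠ 0) :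
    ∀ f p, p.size < f →
      (pvReduceGo f p m).size < m.size ∧ ∃ q, p = pvReduceGo f p m ^^^ clm q m := by
  intro f
  induction f with
  | zero => intro p h; omega
  | succ f' ih =>
    intro p h
    by_cases hc : m.size ≤ p.size
    · have hmsz : 0 < m.size := Nat.size_pos.mpr (Nat.pos_of_ne_zero hm)
      have hp : p ≠ 0 := by
        intro hz; subst hz
        rw [Nat.size_zero] at hc
        omega
      set s := p.size - m.size with hs
      have hshift : (m <<< s).size = p.size := by
        rw [Nat.size_shiftLeft hm]
        omega
      have hlt : (p ^^^ (m <<< s)).size < p.size := pvXor_size_lt hp hshift.symm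
      rw [pvReduceGo, if_pos hc]
      obtain ⟨hsz, q, hq⟩ := ih (p ^^^ (m <<< s)) (by omega)
      refine ⟨hsz, q ^^^ 2 ^ s, ?_⟩
      rw [clm_ldistrib, clm_pow2]
      calc p = (p ^^^ m <<< s) ^^^ (m <<< s) := by
              simp [Nat.xor_assoc, Nat.xor_self, Nat.xor_zero]
        _ = (pvReduceGo f' (p ^^^ m <<< s) m ^^^ clm q m) ^^^ (m <<< s) := by rw [← hq]
        _ = pvReduceGo f' (p ^^^ m <<< s) m ^^^ (clm q m ^^^ m <<< s) := Nat.xor_assoc _ _ _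
    · rw [pvReduceGo, if_neg hc]
      exact ⟨by omega, 0, by rw [clm_zero_left]; simp⟩

theorem pvReduce_size_lt {m : Nat} (hm : m ≠ 0) (p : Nat) : (pvReduce p m).size < m.size :=
  (pvReduceGo_spec hm (p.size + 1) p (by omega)).1

theorem pvReduce_cong {m : Nat} (hm : m ≠ 0) (p : Nat) :
    ∃ q, p = pvReduce p m ^^^ clm q m :=
  (pvReduceGo_spec hm (p.size + 1) p (by omega)).2

theorem pvReduce_fixed {p m : Nat} (h : p.size < m.size) : pvReduce p m = p :=
  pvReduceGo_fixed h _

theorem pvUnique {m : Nat} (hm : m ≠ 0) {r1 r2 q : Nat}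
    (h1 : r1.size < m.size) (h2 : r2.size < m.size) (he : r1 ^^^ r2 = clm q m) : r1 = r2 := by
  by_cases hq : q = 0
  · subst hq
    rw [clm_zero_left] at he
    exact Nat.xor_eq_zero_iff.mp he
  · exfalso
    have hge := clm_size_ge hq hm
    have hd : 0 < m.size := Nat.size_pos.mpr (Nat.pos_of_ne_zero hm)
    have hxlt : (r1 ^^^ r2).size ≤ m.size - 1 := by
      apply Nat.size_le.mpr
      apply Nat.xor_lt_two_pow
      · exact lt_of_lt_of_le (Nat.size_le.mp le_rfl) (Nat.pow_le_pow_right (by omega) (by omega))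
      · exact lt_of_lt_of_le (Nat.size_le.mp le_rfl) (Nat.pow_le_pow_right (by omega) (by omega))
    rw [he] at hxlt
    omega

theorem pvReduce_congr {m : Nat} (hm : m ≠ 0) {p1 p2 q : Nat} (h : p1 ^^^ p2 = clm q m) :
    pvReduce p1 m = pvReduce p2 m := by
  obtain ⟨q1, hq1⟩ := pvReduce_cong hm p1
  obtain ⟨q2, hq2⟩ := pvReduce_cong hm p2
  apply pvUnique hm (pvReduce_size_lt hm p1) (pvReduce_size_lt hm p2)
    (q := q1 ^^^ q2 ^^^ q)
  have e1 : clm q1 m = p1 ^^^ pvReduce p1 m := by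
    calc clm q1 m = (pvReduce p1 m ^^^ clm q1 m) ^^^ pvReduce p1 m := by
            simp [Nat.xor_assoc, Nat.xor_comm, Nat.xor_left_comm, Nat.xor_self, Nat.xor_zero,
              Nat.zero_xor, pvXorCancelLeft]
      _ = p1 ^^^ pvReduce p1 m := by rw [← hq1]
  have e2 : clm q2 m = p2 ^^^ pvReduce p2 m := by
    calc clm q2 m = (pvReduce p2 m ^^^ clm q2 m) ^^^ pvReduce p2 m := by
            simp [Nat.xor_assoc, Nat.xor_comm, Nat.xor_left_comm, Nat.xor_self, Nat.xor_zero,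
              Nat.zero_xor, pvXorCancelLeft]
      _ = p2 ^^^ pvReduce p2 m := by rw [← hq2]
  rw [clm_ldistrib, clm_ldistrib, e1, e2, ← h]
  simp [Nat.xor_assoc, Nat.xor_comm, Nat.xor_left_comm, Nat.xor_self, Nat.xor_zero,
    Nat.zero_xor, pvXorCancelLeft]

-- congruence mod m
def CongM (m a b : Nat) : Prop := ∃ q, a ^^^ b = clm q m

theorem congm_refl (m a : Nat) : CongM m a a := ⟨0, by rw [clm_zero_left]; simp⟩

theorem congm_reduce {m : Nat} (hm : m ≠ 0) (p : Nat) : CongM m (pvReduce p m) p := by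
  obtain ⟨q, hq⟩ := pvReduce_cong hm p
  refine ⟨q, ?_⟩
  calc pvReduce p m ^^^ p = pvReduce p m ^^^ (pvReduce p m ^^^ clm q m) := by rw [← hq]
    _ = clm q m := pvXorCancelLeft _ _

theorem congm_mul {m a a' b b' : Nat} (h1 : CongM m a a') (h2 : CongM m b b') :
    CongM m (clm a b) (clm a' b') := by
  obtain ⟨s, hs⟩ := h1
  obtain ⟨t, ht⟩ := h2
  refine ⟨clm s b ^^^ clm a' t, ?_⟩
  have e1 : a = a' ^^^ clm s m := by
    calc a = (a ^^^ a') ^^^ a' := by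
            simp [Nat.xor_assoc, Nat.xor_self, Nat.xor_zero]
      _ = clm s m ^^^ a' := by rw [hs]
      _ = a' ^^^ clm s m := Nat.xor_comm _ _
  have e2 : b' = b ^^^ clm t m := by
    calc b' = (b ^^^ b') ^^^ b := by
            simp [Nat.xor_assoc, Nat.xor_comm, Nat.xor_left_comm, Nat.xor_self, Nat.xor_zero,
              Nat.zero_xor, pvXorCancelLeft]
      _ = clm t m ^^^ b := by rw [ht]
      _ = b ^^^ clm t m := Nat.xor_comm _ _
  rw [e1, e2]
  rw [clm_ldistrib, clm_rdistrib, clm_ldistrib]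
  have f1 : clm (clm s m) b = clm (clm s b) m := by
    rw [clm_assoc, clm_comm m b, ← clm_assoc]
  have f2 : clm a' (clm t m) = clm (clm a' t) m := by
    rw [← clm_assoc]
  rw [f1, f2]
  simp [Nat.xor_assoc, Nat.xor_comm, Nat.xor_left_comm, Nat.xor_self, Nat.xor_zero,
    Nat.zero_xor, pvXorCancelLeft]

def clpow (x : Nat) : Nat → Nat
  | 0 => 1
  | n+1 => clm x (clpow x n)

theorem congm_pow {m x x' : Nat} (h : CongM m x x') : ∀ n, CongM m (clpow x n) (clpow x' n) := by
  intro n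
  induction n with
  | zero => exact congm_refl m 1
  | succ n ih => exact congm_mul h ih

theorem pvReduce_eq_of_congm {m : Nat} (hm : m ≠ 0) {p1 p2 : Nat} (h : CongM m p1 p2) :
    pvReduce p1 m = pvReduce p2 m := by
  obtain ⟨q, hq⟩ := h
  exact pvReduce_congr hm hq

theorem clpow_add (x s t : Nat) : clpow x (s + t) = clm (clpow x s) (clpow x t) := by
  induction s with
  | zero => simp [clpow, clm_one_left]
  | succ n ih =>
    have hn : n + 1 + t = (n + t) + 1 := by omega
    rw [hn]
    show clm x (clpow x (n + t)) = clm (clm x (clpow x n)) (clpow x t)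
    rw [ih, clm_assoc]

theorem clpow_two_mul (x n : Nat) : clpow (clm x x) n = clpow x (2 * n) := by
  induction n with
  | zero => rfl
  | succ n ih =>
    show clm (clm x x) (clpow (clm x x) n) = clpow x (2 * (n + 1))
    rw [ih, show 2 * (n + 1) = 2 + 2 * n from by ring, clpow_add]
    congr 1
    show clm x x = clm x (clm x 1)
    rw [clm_one_right]

-- ===== the A-side bitmask loop equals the canonical remainder =====

theorem pvPowLoopB_spec {m : Nat} (hm : m ≠ 0) :
    ∀ (n : Nat) (k : Int), k.toNat ≤ n → 1 ≤ k → ∀ r x,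
      pvPowLoopB k r x m = pvReduce (clm r (clpow x k.toNat)) m := by
  intro n
  induction n with
  | zero => intro k hk h1 r x; omega
  | succ n ih =>
    intro k hk h1 r x
    rw [pvPowLoopB, dif_pos (by omega : k > 0)]
    have hfd : PySem.Int.floordiv k 2 = k / 2 :=
      PySem.Int.floordiv_eq_ediv_of_pos (by omega : (0:Int) < 2)
    have hmd : PySem.Int.mod k 2 = k % 2 :=
      PySem.Int.mod_eq_emod_of_pos (by omega : (0:Int) < 2)
    by_cases hk1 : k = 1
    · subst hk1
      rw [hfd, hmd]
      have h12 : (1:Int) / 2 = 0 := by decide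
      have h1m : (1:Int) % 2 = 1 := by decide
      rw [h12, h1m, if_pos (by rfl)]
      rw [pvPowLoopB, dif_neg (by omega : ¬ (0:Int) > 0)]
      rw [pvClmul_eq_clm]
      have hp1 : clpow x (1:Int).toNat = x := by
        show clm x 1 = x
        exact clm_one_right x
      rw [hp1]
    · have hk2 : 2 ≤ k := by omega
      have hkd : 1 ≤ k / 2 := by omega
      have hkdn : (k / 2).toNat ≤ n := by omega
      rw [hfd, hmd]
      by_cases hodd : k % 2 == 1
      · rw [if_pos hodd]
        rw [ih (k / 2) hkdn hkd, pvClmul_eq_clm, pvClmul_eq_clm]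
        have ho : k % 2 = 1 := by simpa using hodd
        have hkt : k.toNat = 2 * (k / 2).toNat + 1 := by omega
        have E : clm (clm r x) (clpow (clm x x) (k / 2).toNat) = clm r (clpow x k.toNat) := by
          rw [clpow_two_mul, clm_assoc, hkt]
          rfl
        rw [← E]
        exact pvReduce_eq_of_congm hm
          (congm_mul (congm_reduce hm _) (congm_pow (congm_reduce hm _) _))
      · rw [if_neg hodd]
        rw [ih (k / 2) hkdn hkd, pvClmul_eq_clm]
        have ho : k % 2 = 0 := by
          rcases Int.emod_two_eq k with h | h
          · exact h
          · exfalso; apply hodd; rw [h]; decide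
        have hkt : k.toNat = 2 * (k / 2).toNat := by omega
        have E : clm r (clpow (clm x x) (k / 2).toNat) = clm r (clpow x k.toNat) := by
          rw [clpow_two_mul, ← hkt]
        rw [← E]
        exact pvReduce_eq_of_congm hm
          (congm_mul (congm_refl m r) (congm_pow (congm_reduce hm _) _))

-- ===== the B-side Horner loops compute the canonical remainder =====

theorem pvStepReduce {m : Nat} (hm : m ≠ 0) (p : Nat) (hp : p.size ≤ m.size) :
    (if (p >>> (m.size - 1)) &&& 1 == 1 then p ^^^ m else p) = pvReduce p m := by
  have hd : 0 < m.size := Nat.size_pos.mpr (Nat.pos_of_ne_zero hm)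
  have hplt : p < 2 ^ m.size := lt_of_lt_of_le (Nat.size_le.mp le_rfl)
    (Nat.pow_le_pow_right (by omega) hp)
  have h4 : 2 ^ m.size = 2 ^ (m.size - 1) * 2 := by
    conv_lhs => rw [show m.size = (m.size - 1) + 1 from by omega]
    rw [pow_succ]
  have h5 : 0 < 2 ^ (m.size - 1) := Nat.two_pow_pos _
  by_cases hbit : p >>> (m.size - 1) = 1
  · rw [if_pos (show ((p >>> (m.size - 1)) &&& 1 == 1) = true from by rw [hbit]; decide)]
    have hge : 2 ^ (m.size - 1) ≤ p := by
      by_contra hnot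
      push_neg at hnot
      rw [Nat.shiftRight_eq_div_pow, Nat.div_eq_of_lt hnot] at hbit
      omega
    have hpsz : p.size = m.size := by
      have ha : p.size ≤ m.size := hp
      have hb2 : m.size - 1 < p.size := Nat.lt_size.mpr hge
      omega
    have hpne : p ≠ 0 := by
      intro hz; subst hz; rw [Nat.size_zero] at hpsz; omega
    have hxor : (p ^^^ m).size < m.size := by
      have := pvXor_size_lt hpne hpsz
      omega
    rw [pvReduce, pvReduceGo, if_pos (by omega)]
    rw [show p.size - m.size = 0 from by omega]
    rw [Nat.shiftLeft_zero]
    exact (pvReduceGo_fixed hxor _).symm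
  · have hdivlt : p / 2 ^ (m.size - 1) < 2 := Nat.div_lt_of_lt_mul (by omega)
    have h0 : p >>> (m.size - 1) = 0 := by
      rw [Nat.shiftRight_eq_div_pow]
      rw [Nat.shiftRight_eq_div_pow] at hbit
      rcases Nat.le_one_iff_eq_zero_or_eq_one.mp (by omega : p / 2 ^ (m.size - 1) ≤ 1) with h | h
      · exact h
      · exact absurd h hbit
    rw [if_neg (show ¬ ((p >>> (m.size - 1)) &&& 1 == 1) = true from by rw [h0]; decide)]
    have hlt : p < 2 ^ (m.size - 1) := by
      rw [Nat.shiftRight_eq_div_pow] at h0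
      exact Nat.lt_of_div_eq_zero h5 h0
    have hsz : p.size < m.size := by
      have := Nat.size_le.mpr hlt
      omega
    exact (pvReduce_fixed hsz).symm

theorem pvReduce_lt_half {m : Nat} (hm : m ≠ 0) (p : Nat) :
    pvReduce p m < 2 ^ (m.size - 1) := by
  have h1 := pvReduce_size_lt hm p
  have h2 : pvReduce p m < 2 ^ (pvReduce p m).size := Nat.size_le.mp le_rfl
  exact lt_of_lt_of_le h2 (Nat.pow_le_pow_right (by omega) (by omega))

theorem pvLowBit_add (x c : Nat) (hc : c < 2) : (x <<< 1) ^^^ c = 2 * x + c := by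
  have hsh : x <<< 1 = 2 * x := by rw [Nat.shiftLeft_eq]; ring
  rw [hsh, pvTwoMulXorBit _ _ hc]

theorem pvLowBit_or (x c : Nat) (hc : c < 2) : (x <<< 1) ||| c = (x <<< 1) ^^^ c := by
  have hsh : x <<< 1 = 2 * x := by rw [Nat.shiftLeft_eq]; ring
  rw [hsh, pvTwoMulOrBit _ _ hc, pvTwoMulXorBit _ _ hc]

theorem pvAnd_one (n : Nat) : n &&& 1 = n % 2 := Nat.and_one_is_mod n

theorem pvShiftRight_split (a i : Nat) : a >>> i = 2 * (a >>> (i + 1)) + (a >>> i) % 2 := by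
  rw [Nat.shiftRight_succ]
  omega

theorem pvStepSize {m : Nat} (hm : m ≠ 0) {r w : Nat} (hr : r < 2 ^ (m.size - 1))
    (hw : w < 2 ^ m.size) : ((r <<< 1) ^^^ w).size ≤ m.size := by
  have hd : 0 < m.size := Nat.size_pos.mpr (Nat.pos_of_ne_zero hm)
  have h4 : 2 ^ m.size = 2 ^ (m.size - 1) * 2 := by
    conv_lhs => rw [show m.size = (m.size - 1) + 1 from by omega]
    rw [pow_succ]
  apply Nat.size_le.mpr
  apply Nat.xor_lt_two_pow _ hw
  rw [Nat.shiftLeft_eq]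
  omega

theorem pvMulmodGo_spec {m : Nat} (hm : m ≠ 0) (a b : Nat) (hb : b < 2 ^ (m.size - 1)) :
    ∀ i r, r = pvReduce (clm (a >>> i) b) m →
      pvMulmodGo a b m m.size i r = pvReduce (clm a b) m := by
  intro i
  induction i with
  | zero =>
    intro r hr
    rw [pvMulmodGo, hr]
    rfl
  | succ i ih =>
    intro r hr
    rw [pvMulmodGo]
    apply ih
    show (if ((((r <<< 1) ^^^ (if (a >>> i) &&& 1 == 1 then b else 0)) >>> (m.size - 1)) &&& 1 == 1)
          then ((r <<< 1) ^^^ (if (a >>> i) &&& 1 == 1 then b else 0)) ^^^ m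
          else ((r <<< 1) ^^^ (if (a >>> i) &&& 1 == 1 then b else 0))) = _
    have hd : 0 < m.size := Nat.size_pos.mpr (Nat.pos_of_ne_zero hm)
    have hrlt : r < 2 ^ (m.size - 1) := by rw [hr]; exact pvReduce_lt_half hm _
    set v := (r <<< 1) ^^^ (if (a >>> i) &&& 1 == 1 then b else 0) with hv
    have hvsz : v.size ≤ m.size := by
      apply pvStepSize hm hrlt
      split
      · exact lt_of_lt_of_le hb (Nat.pow_le_pow_right (by omega) (by omega))
      · exact Nat.two_pow_pos _
    rw [pvStepReduce hm v hvsz]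
    obtain ⟨q, hq⟩ := pvReduce_cong hm (clm (a >>> (i+1)) b)
    set R := pvReduce (clm (a >>> (i+1)) b) m with hR
    apply pvReduce_eq_of_congm hm
    refine ⟨q <<< 1, ?_⟩
    rw [clm_shl_left]
    by_cases hpar : (a >>> i) % 2 = 1
    · have hbitc : ((a >>> i) &&& 1 == 1) = true := by rw [pvAnd_one, hpar]; rfl
      have hv' : v = (r <<< 1) ^^^ b := by rw [hv, hbitc]; simp
      have hsplit1 : a >>> i = 2 * (a >>> (i+1)) + 1 := by
        have := pvShiftRight_split a i
        omega
      have hclm : clm (a >>> i) b = b ^^^ (clm (a >>> (i+1)) b <<< 1) := by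
        rw [hsplit1, clm_two_mul_add _ _ _ (by omega), if_pos rfl]
      rw [hv', hclm, hr, hq, Nat.shiftLeft_xor_distrib]
      simp [Nat.xor_assoc, Nat.xor_comm, Nat.xor_left_comm, Nat.xor_self, Nat.xor_zero,
        Nat.zero_xor, pvXorCancelLeft]
    · have hbitc : ((a >>> i) &&& 1 == 1) = false := by
        rw [pvAnd_one]
        have h00 : (a >>> i) % 2 = 0 := by omega
        rw [h00]
        rfl
      have hv' : v = (r <<< 1) ^^^ 0 := by rw [hv, hbitc]; simp
      have hsplit0 : a >>> i = 2 * (a >>> (i+1)) + 0 := by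
        have := pvShiftRight_split a i
        omega
      have hclm : clm (a >>> i) b = clm (a >>> (i+1)) b <<< 1 := by
        rw [hsplit0, clm_two_mul_add _ _ _ (by omega), if_neg (by omega), Nat.zero_xor]
      rw [hv', hclm, hr, hq, Nat.shiftLeft_xor_distrib]
      simp [Nat.xor_assoc, Nat.xor_comm, Nat.xor_left_comm, Nat.xor_self, Nat.xor_zero,
        Nat.zero_xor, pvXorCancelLeft]

theorem pvShiftRight_size (a : Nat) : a >>> a.size = 0 := pvShiftSmall a a.size le_rfl

theorem pvZeroSizeLt {m : Nat} (hm : m ≠ 0) : (0:Nat).size < m.size := by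
  rw [Nat.size_zero]
  exact Nat.size_pos.mpr (Nat.pos_of_ne_zero hm)

theorem pvMulmod_spec {m : Nat} (hm : m ≠ 0) (a b : Nat) (hb : b < 2 ^ (m.size - 1)) :
    pvMulmod a b m m.size = pvReduce (clm a b) m := by
  rw [pvMulmod]
  apply pvMulmodGo_spec hm a b hb
  rw [pvShiftRight_size, clm_zero_left]
  exact (pvReduce_fixed (pvZeroSizeLt hm)).symm

theorem pvRedGo_spec {m : Nat} (hm : m ≠ 0) (a : Nat) :
    ∀ i r, r = pvReduce (a >>> i) m → pvRedGo a m m.size i r = pvReduce a m := by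
  intro i
  induction i with
  | zero =>
    intro r hr
    rw [pvRedGo, hr]
    rfl
  | succ i ih =>
    intro r hr
    rw [pvRedGo]
    apply ih
    show (if ((((r <<< 1) ||| ((a >>> i) &&& 1)) >>> (m.size - 1)) &&& 1 == 1)
          then ((r <<< 1) ||| ((a >>> i) &&& 1)) ^^^ m
          else ((r <<< 1) ||| ((a >>> i) &&& 1))) = _
    have hd : 0 < m.size := Nat.size_pos.mpr (Nat.pos_of_ne_zero hm)
    have hrlt : r < 2 ^ (m.size - 1) := by rw [hr]; exact pvReduce_lt_half hm _
    have hc2 : (a >>> i) &&& 1 < 2 := by rw [pvAnd_one]; omega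
    rw [pvLowBit_or _ _ hc2]
    set c := (a >>> i) &&& 1 with hc
    set v := (r <<< 1) ^^^ c with hv
    have hvsz : v.size ≤ m.size := by
      apply pvStepSize hm hrlt
      calc c < 2 := hc2
        _ ≤ 2 ^ m.size := by
            have h1 : (2:Nat) ^ 1 ≤ 2 ^ m.size := Nat.pow_le_pow_right (by omega) (by omega)
            simpa using h1
    rw [pvStepReduce hm v hvsz]
    obtain ⟨q, hq⟩ := pvReduce_cong hm (a >>> (i+1))
    set R := pvReduce (a >>> (i+1)) m with hR
    apply pvReduce_eq_of_congm hm
    refine ⟨q <<< 1, ?_⟩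
    rw [clm_shl_left]
    have hA : a >>> i = ((a >>> (i+1)) <<< 1) ^^^ c := by
      rw [pvLowBit_add _ _ hc2, hc, pvAnd_one]
      exact pvShiftRight_split a i
    rw [hv, hA, hr, hq, Nat.shiftLeft_xor_distrib]
    simp [Nat.xor_assoc, Nat.xor_comm, Nat.xor_left_comm, Nat.xor_self, Nat.xor_zero,
      Nat.zero_xor, pvXorCancelLeft]

theorem pvRed_spec {m : Nat} (hm : m ≠ 0) (a : Nat) : pvRed a m m.size = pvReduce a m := by
  rw [pvRed]
  apply pvRedGo_spec hm a
  rw [pvShiftRight_size]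
  exact (pvReduce_fixed (pvZeroSizeLt hm)).symm

theorem pvPw_spec {m : Nat} (hm : m ≠ 0) (xv : Nat) :
    ∀ (n : Nat) (e : Int), e.toNat ≤ n → 1 ≤ e →
      pvPw (pvReduce xv m) m m.size e = pvReduce (clpow xv e.toNat) m := by
  intro n
  induction n with
  | zero => intro e he h1; omega
  | succ n ih =>
    intro e he h1
    by_cases he1 : e ≤ 1
    · have he' : e = 1 := by omega
      subst he'
      rw [pvPw, dif_pos (by omega : (1:Int) ≤ 1)]
      have hp1 : clpow xv (1:Int).toNat = xv := by
        show clm xv 1 = xv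
        exact clm_one_right xv
      rw [hp1]
    · rw [pvPw, dif_neg he1]
      have hfd : PySem.Int.floordiv e 2 = e / 2 :=
        PySem.Int.floordiv_eq_ediv_of_pos (by omega : (0:Int) < 2)
      have hmd : PySem.Int.mod e 2 = e % 2 :=
        PySem.Int.mod_eq_emod_of_pos (by omega : (0:Int) < 2)
      have he2 : 2 ≤ e := by omega
      have hed : 1 ≤ e / 2 := by omega
      have hedn : (e / 2).toNat ≤ n := by omega
      rw [hfd, hmd]
      rw [ih (e / 2) hedn hed]
      have hh2 : pvMulmod (pvReduce (clpow xv (e / 2).toNat) m)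
            (pvReduce (clpow xv (e / 2).toNat) m) m m.size
          = pvReduce (clm (pvReduce (clpow xv (e / 2).toNat) m)
              (pvReduce (clpow xv (e / 2).toNat) m)) m :=
        pvMulmod_spec hm _ _ (pvReduce_lt_half hm _)
      have hE2 : clm (clpow xv (e / 2).toNat) (clpow xv (e / 2).toNat)
          = clpow xv (2 * (e / 2).toNat) := by
        rw [← clpow_add]
        congr 1
        omega
      have hcsq : pvReduce (clm (pvReduce (clpow xv (e / 2).toNat) m)
            (pvReduce (clpow xv (e / 2).toNat) m)) m
          = pvReduce (clpow xv (2 * (e / 2).toNat)) m := by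
        rw [← hE2]
        exact pvReduce_eq_of_congm hm
          (congm_mul (congm_reduce hm _) (congm_reduce hm _))
      by_cases hodd : e % 2 == 1
      · rw [if_pos hodd]
        rw [hh2, hcsq]
        rw [pvMulmod_spec hm _ _ (pvReduce_lt_half hm _)]
        have ho : e % 2 = 1 := by simpa using hodd
        have het : e.toNat = 2 * (e / 2).toNat + 1 := by omega
        have E : clm (clpow xv (2 * (e / 2).toNat)) xv = clpow xv e.toNat := by
          rw [het]
          calc clm (clpow xv (2 * (e / 2).toNat)) xv
              = clm xv (clpow xv (2 * (e / 2).toNat)) := clm_comm _ _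
            _ = clpow xv (2 * (e / 2).toNat + 1) := rfl
        rw [← E]
        exact pvReduce_eq_of_congm hm
          (congm_mul (congm_reduce hm _) (congm_reduce hm _))
      · rw [if_neg hodd]
        rw [hh2, hcsq]
        have ho : e % 2 = 0 := by
          rcases Int.emod_two_eq e with h | h
          · exact h
          · exfalso; apply hodd; rw [h]; decide
        have het : e.toNat = 2 * (e / 2).toNat := by omega
        rw [← het]

theorem pvVal_pos {p : List Int} (hp : pvBits01 p) (h1 : (1:Int) ∈ p) : pvVal p ≠ 0 := by
  induction p with
  | nil => simp at h1
  | cons c t ih =>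
    have hc := hp c (by simp)
    have ht : pvBits01 t := fun z hz => hp z (by simp [hz])
    rcases List.mem_cons.mp h1 with h | h
    · have : c = 1 := h.symm
      subst this
      simp only [pvVal]
      omega
    · have := ih ht h
      simp only [pvVal]
      omega

theorem final_eq (x : List Int) (k : Int) (mod_poly : List Int)
    (hpre : k ≤ 0 ∨ ((∀ c ∈ x, c = 0 ∨ c = 1) ∧ (∀ c ∈ mod_poly, c = 0 ∨ c = 1) ∧ (1 : Int) ∈ mod_poly)) :
    gf2_poly_powmod x k mod_poly = gf2_poly_powmod_alt x k mod_poly := by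
  rcases hpre with hk | ⟨hx, hm, h1⟩
  · rw [gf2_poly_powmod, gf2_poly_powmod_alt, pvPowLoopA, dif_neg (by omega : ¬ k > 0),
      if_pos hk]
  · by_cases hk0 : k ≤ 0
    · rw [gf2_poly_powmod, gf2_poly_powmod_alt, pvPowLoopA, dif_neg (by omega : ¬ k > 0),
        if_pos hk0]
    · have hk1 : 1 ≤ k := by omega
      have hmz : pvVal mod_poly ≠ 0 := pvVal_pos hm h1
      have hr : pvBits01 [1] := by
        intro c hc
        simp at hc
        simp [hc]
      have hsr : pvStP [1] := by
        intro c hc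
        simp at hc
        omega
      obtain ⟨v, b2, s2⟩ := pvPow_val hm h1 k.toNat k le_rfl [1] x hr hsr hx
      have hA : gf2_poly_powmod x k mod_poly
          = pvBits (pvPowLoopB k 1 (pvVal x) (pvVal mod_poly)) := by
        rw [gf2_poly_powmod]
        rw [show (1:Nat) = pvVal [1] from by simp [pvVal], ← v, pvBits_val b2 s2]
      have hB : gf2_poly_powmod_alt x k mod_poly
          = pvBits (pvPw (pvRed (pvMask x) (pvMask mod_poly) (pvMask mod_poly).size)
              (pvMask mod_poly) (pvMask mod_poly).size k) := by
        rw [gf2_poly_powmod_alt, if_neg hk0]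
      rw [hA, hB, pvMask_eq_val hm, pvMask_eq_val hx]
      rw [pvPowLoopB_spec hmz k.toNat k le_rfl hk1]
      rw [pvRed_spec hmz, pvPw_spec hmz (pvVal x) k.toNat k le_rfl hk1]
      congr 2
      exact clm_one_left _

-- ===== VERDICT (by name: the statement is the Claim_ definition above) =====
theorem gf2_poly_powmod_spec : Claim_equal_gf2_poly_powmod := by
  intro x k mod_poly _dom hpre
  unfold Pre_gf2_poly_powmod at hpre
  unfold Spec_gf2_poly_powmod
  exact final_eq x k mod_poly hpre
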